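-- pv_equiv track=rewrite | github.com/BBO513/guardian-node | guardian-node/guardian_interpreter/protocols/router_security_protocol.py | _determine_router_status
-- ===== SOURCE A (Python) =====
-- from typing import Dict, List, Any, Optional
--
-- def _determine_router_status(findings: List[Dict[str, Any]]) -> str:
--     """Determine overall router security status"""
--     if not findings:
--         return 'secure'
--
--     # Check for critical findings
--     for finding in findings:
--         severity = finding.get('severity', 'info').lower()
--         if severity == 'critical':
--             return 'critical'
--
--     # Check for high/medium severity findings
--     medium_high_count = 0
--     for finding in findings:
--         severity = finding.get('severity', 'info').lower()
--         if severity in ['high', 'medium']: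
--             medium_high_count += 1
--
--     if medium_high_count >= 3:
--         return 'critical'
--     elif medium_high_count >= 1:
--         return 'warning'
--
--     return 'secure'
-- ===== SOURCE B (Python) =====
-- _WEIGHTS = {'critical': 3, 'high': 1, 'medium': 1}
--
-- def _determine_router_status(findings):
--     """Determine overall router security status (weighted-score reduction)."""
--     score = sum(_WEIGHTS.get(f.get('severity', 'info').lower(), 0) for f in findings)
--     if score >= 3:
--         return 'critical'
--     if score >= 1:
--         return 'warning'
--     return 'secure'
-- ===== Notes on version B (the rewrite author's own statement) =====
-- stated objective: alternative
-- what changed: Replaced A's two staged early-returning scans and categorical branching with a single weighted-score reduction: each finding maps to a numeric weight (critical=3, high/medium=1, else 0), the weights are summed in one pass, and the status is read off two thresholds on that one number, with no separate critical check.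
import Mathlib
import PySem

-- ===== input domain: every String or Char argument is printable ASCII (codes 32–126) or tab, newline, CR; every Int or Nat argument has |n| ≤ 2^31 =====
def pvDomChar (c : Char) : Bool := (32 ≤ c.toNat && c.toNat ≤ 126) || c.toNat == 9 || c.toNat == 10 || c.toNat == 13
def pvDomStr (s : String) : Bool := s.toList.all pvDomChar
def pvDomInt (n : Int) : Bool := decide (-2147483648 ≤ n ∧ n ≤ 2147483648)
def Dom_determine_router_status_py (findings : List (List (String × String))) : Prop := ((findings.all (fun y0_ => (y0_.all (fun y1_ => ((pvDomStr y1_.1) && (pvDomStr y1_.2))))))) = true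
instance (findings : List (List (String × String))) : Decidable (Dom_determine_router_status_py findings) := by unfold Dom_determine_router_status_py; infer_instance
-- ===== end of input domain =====

-- B replaces A's two staged early-returning scans with a single weighted-score reduction (critical=3, high/medium=1) decided by two thresholds; alternative decomposition, same O(n) cost.


-- ===== PORT A =====
-- severity = finding.get('severity', 'info').lower()  (shared expression of both Pythons)
def pvSev (finding : List (String × String)) : String :=
  PySem.Str.lower (PySem.Dict.getD (PySem.Dict.mk finding) "severity" "info")

-- first loop of A: early return 'critical' on the first critical finding
def drsFindCritical : List (List (String × String)) → Bool
  | [] => false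
  | f :: rest => if pvSev f = "critical" then true else drsFindCritical rest

def determine_router_status_py (findings : List (List (String × String))) : String :=
  if findings = [] then "secure"
  else if drsFindCritical findings then "critical"
  else
    let medium_high_count : Int :=
      findings.foldl
        (fun acc f => if pvSev f = "high" ∨ pvSev f = "medium" then acc + 1 else acc) 0
    if medium_high_count ≥ 3 then "critical"
    else if medium_high_count ≥ 1 then "warning"
    else "secure"

-- ===== PORT B =====
-- _WEIGHTS = {'critical': 3, 'high': 1, 'medium': 1}
def pvWeights : PySem.Dict String Int :=
  PySem.Dict.mk [("critical", 3), ("high", 1), ("medium", 1)]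

-- score = sum(_WEIGHTS.get(sev, 0) for f in findings); then two thresholds on the score
def determine_router_status_py_alt (findings : List (List (String × String))) : String :=
  let score : Int := (findings.map (fun f => pvWeights.getD (pvSev f) 0)).sum
  if score ≥ 3 then "critical"
  else if score ≥ 1 then "warning"
  else "secure"

-- ===== PRECONDITION & SPEC =====
def Spec_determine_router_status_py (findings : List (List (String × String))) (out : String) : Prop := out = determine_router_status_py_alt findings
instance (findings : List (List (String × String))) (out : String) : Decidable (Spec_determine_router_status_py findings out) := by unfold Spec_determine_router_status_py; infer_instance

-- ===== CLAIM (what is proved, stated in full; the proofs are below) =====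
def Claim_equal_determine_router_status_py : Prop := ∀ (findings : List (List (String × String))), Dom_determine_router_status_py findings → Spec_determine_router_status_py findings (determine_router_status_py findings)

-- ===== LEMMAS AND PROOFS =====
lemma drsWeight (s : String) :
    pvWeights.getD s 0 =
      if s = "critical" then 3 else if s = "high" ∨ s = "medium" then 1 else 0 := by
  have h0 : (PySem.Dict.mk ([] : List (String × Int))).get? s = none := rfl
  by_cases h1 : s = "critical"
  · subst h1; rfl
  by_cases h2 : s = "high"
  · subst h2; rfl
  by_cases h3 : s = "medium"
  · subst h3; rfl
  simp [pvWeights, PySem.Dict.getD_eq_get?_getD, PySem.Dict.get?_mk_cons,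
    h0, h1, h2, h3, Ne.symm h1, Ne.symm h2, Ne.symm h3]

lemma drsFindCritical_eq_count (l : List (List (String × String))) :
    drsFindCritical l = (0 < (l.map pvSev).count "critical") := by
  induction l with
  | nil => simp [drsFindCritical]
  | cons f rest ih =>
    by_cases h : pvSev f = "critical" <;> simp [drsFindCritical, h, ih]

lemma drsCount_eq (l : List (List (String × String))) (acc : Int) :
    l.foldl (fun acc f => if pvSev f = "high" ∨ pvSev f = "medium" then acc + 1 else acc) acc
      = acc + ((l.map pvSev).countP (fun s => s = "high" ∨ s = "medium") : Int) := by
  induction l generalizing acc with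
  | nil => simp
  | cons f rest ih =>
    by_cases h : pvSev f = "high" ∨ pvSev f = "medium" <;>
      simp [h, ih]; ring

lemma drsScore_eq (l : List (List (String × String))) :
    (l.map (fun f => pvWeights.getD (pvSev f) 0)).sum
      = 3 * ((l.map pvSev).count "critical" : Int)
        + ((l.map pvSev).countP (fun s => s = "high" ∨ s = "medium") : Int) := by
  induction l with
  | nil => simp
  | cons f rest ih =>
    simp only [List.map_cons, List.sum_cons, List.count_cons, List.countP_cons, ih]
    rw [drsWeight]
    by_cases h1 : pvSev f = "critical"
    · have h2 : ¬ (pvSev f = "high" ∨ pvSev f = "medium") := by rintro (h | h) <;> simp_all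
      simp only [h1, if_true]
      simp
      ring
    · by_cases h2 : pvSev f = "high" ∨ pvSev f = "medium"
      · simp only [h2, if_true, if_neg h1]
        simp [h1]
        ring
      · simp [h1, h2]

-- ===== VERDICT (by name: the statement is the Claim_ definition above) =====
theorem determine_router_status_py_spec : Claim_equal_determine_router_status_py := by
  intro findings _
  unfold Spec_determine_router_status_py determine_router_status_py determine_router_status_py_alt
  rcases findings with _ | ⟨f, rest⟩
  · simp
  · rw [drsScore_eq]
    simp only [drsFindCritical_eq_count, drsCount_eq, zero_add,
      if_neg (by simp : ¬ (f :: rest = []))]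
    split_ifs <;> first | rfl | (exfalso; omega)
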